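-- pv_equiv track=rewrite | github.com/enirobot/codingtest | python/신고_결과_받기.py | solution
-- ===== SOURCE A (Python) =====
-- from collections import defaultdict
--
-- def solution(id_list, report, k):
--     black_list = defaultdict(set)
--     users = dict.fromkeys(id_list, 0)
--
--     for s in report:
--         l, r = s.split()
--         black_list[r].add(l)
--
--     for ids in black_list.values():
--         if len(ids) < k:
--             continue
--         for _id in ids:
--             users[_id] += 1
--
--     return list(users.values())
-- ===== SOURCE B (Python) =====
-- def solution(id_list, report, k):
--     # Dedup (reporter, reportee) pairs once, count unique reports per reportee
--     # as an explicit table, then emit each user's score by a per-user count.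
--     pairs = list(dict.fromkeys(tuple(s.split()) for s in report))
--     cnt = {}
--     for _l, r in pairs:
--         cnt[r] = cnt.get(r, 0) + 1
--     return [sum(1 for l, r in pairs if l == u and cnt[r] >= k)
--             for u in dict.fromkeys(id_list)]
-- ===== Notes on version B (the rewrite author's own statement) =====
-- stated objective: alternative
-- what changed: Replaces A's dict-of-sets accumulator and nested increment loops over users with a deduped (reporter, reportee) pair list, an explicit per-reportee count table, and a per-user counting comprehension (no mutable users dict).
import Mathlib
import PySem

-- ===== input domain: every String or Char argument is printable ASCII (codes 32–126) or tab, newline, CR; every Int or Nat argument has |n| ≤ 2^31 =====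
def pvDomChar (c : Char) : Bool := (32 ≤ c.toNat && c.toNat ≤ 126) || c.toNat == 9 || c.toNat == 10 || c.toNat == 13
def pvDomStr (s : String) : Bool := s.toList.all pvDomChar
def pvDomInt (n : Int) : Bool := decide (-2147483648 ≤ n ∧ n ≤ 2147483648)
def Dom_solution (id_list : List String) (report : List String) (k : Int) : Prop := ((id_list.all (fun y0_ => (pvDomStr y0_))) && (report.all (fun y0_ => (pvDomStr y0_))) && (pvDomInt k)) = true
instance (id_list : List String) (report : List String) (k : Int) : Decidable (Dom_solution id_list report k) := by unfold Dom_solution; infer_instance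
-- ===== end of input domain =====

-- B replaces A's dict-of-sets and nested increment loops by a deduped pair list, an explicit
-- count table, and a per-user comprehension (objective: alternative decomposition, same cost).

-- helper used by Pre_ below: the parsed (reporter, reportee) pairs of the report list
def pvParse (s : String) : String × String :=
  match PySem.Str.split₀ s with
  | [l, r] => (l, r)
  | _ => ("", "")
def pvParsed (report : List String) : List (String × String) := report.map pvParse

-- ===== PORT A =====
-- A: black_list = defaultdict(set) keyed by reportee; users = dict.fromkeys(id_list, 0);
-- then for each reportee with >= k distinct reporters, increment each reporter's entry.
def solution (id_list : List String) (report : List String) (k : Int) : List Int :=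
  let black_list : PySem.Dict String (PySem.Set String) :=
    report.foldl (fun d s =>
      match PySem.Str.split₀ s with
      | [l, r] => d.insert r (PySem.Set.add (d.getD r PySem.Set.empty) l)
      | _ => d  -- Python raises ValueError on unpacking here; excluded by Pre_
      ) PySem.Dict.empty
  let users0 : PySem.Dict String Int :=
    id_list.foldl (fun u i => u.insert i 0) PySem.Dict.empty
  let users :=
    black_list.values.foldl (fun u ids =>
      if (ids.length : Int) < k then u
      else ids.foldl (fun u i => u.insert i (u.getD i 0 + 1)) u
        -- Python raises KeyError when i is not a key of users; excluded by Pre_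
      ) users0
  users.values

-- ===== PORT B =====
def solution_alt (id_list : List String) (report : List String) (k : Int) : List Int :=
  let pairs : List (String × String) :=
    PySem.List.dedup (report.map (fun s =>
      match PySem.Str.split₀ s with
      | [l, r] => (l, r)
      | _ => ("", "")  -- Python raises ValueError on unpacking here; excluded by Pre_
      ))
  let cnt : PySem.Dict String Int :=
    pairs.foldl (fun d p => d.insert p.2 (d.getD p.2 0 + 1)) PySem.Dict.empty
  (PySem.List.dedup id_list).map (fun u =>
    ((pairs.filter (fun p => p.1 == u && decide (k ≤ cnt.getD p.2 0))).length : Int))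

-- ===== PRECONDITION & SPEC =====

-- Pre_ excludes exactly the inputs where A raises: a report entry that does not split into
-- exactly two words (ValueError), or a reporter of a user with >= k distinct reports who is
-- not in id_list (KeyError on users[_id] += 1).
def Pre_solution (id_list : List String) (report : List String) (k : Int) : Prop :=
  (∀ s ∈ report, (PySem.Str.split₀ s).length = 2) ∧
  (∀ p ∈ PySem.List.dedup (pvParsed report),
     k ≤ (((PySem.List.dedup (pvParsed report)).filter (fun q => q.2 == p.2)).length : Int) →
     p.1 ∈ id_list)
instance (id_list : List String) (report : List String) (k : Int) : Decidable (Pre_solution id_list report k) := by unfold Pre_solution; infer_instance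

def pvWitness_solution : List String × List String × Int := (["ab", "cd"], ["ab cd", "cd ab"], 1)

def Spec_solution (id_list : List String) (report : List String) (k : Int) (out : List Int) : Prop := out = solution_alt id_list report k
instance (id_list : List String) (report : List String) (k : Int) (out : List Int) : Decidable (Spec_solution id_list report k out) := by unfold Spec_solution; infer_instance

-- ===== CLAIM (what is proved, stated in full; the proofs are below) =====
def Claim_equal_solution : Prop := ∀ (id_list : List String) (report : List String) (k : Int), Dom_solution id_list report k → Pre_solution id_list report k → Spec_solution id_list report k (solution id_list report k)

-- ===== LEMMAS AND PROOFS =====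

-- the distinct reporters of reportee r, in first-report order (A's black_list[r], as built)
def pvGrp (D : List (String × String)) (r : String) : List String :=
  (D.filter (fun q => q.2 == r)).map (·.1)

theorem mem_pvGrp (D : List (String × String)) (x r : String) : x ∈ pvGrp D r ↔ (x, r) ∈ D := by
  simp only [pvGrp, List.mem_map, List.mem_filter, beq_iff_eq]
  constructor
  · rintro ⟨q, ⟨hq, h2⟩, h1⟩; cases q; simp_all
  · intro h; exact ⟨(x, r), ⟨h, rfl⟩, rfl⟩

theorem pvGrp_append (D : List (String × String)) (p : String × String) (r : String) :
    pvGrp (D ++ [p]) r = pvGrp D r ++ (if p.2 = r then [p.1] else []) := by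
  simp [pvGrp, List.filter_append]
  split_ifs with h <;> simp [h]

-- A's black_list fold, looked up at any key, yields pvGrp of the deduped pairs
theorem black_getD (ps : List (String × String)) (r : String) :
    (ps.foldl (fun d p => d.insert p.2 (PySem.Set.add (d.getD p.2 PySem.Set.empty) p.1))
      (PySem.Dict.empty : PySem.Dict String (PySem.Set String))).getD r PySem.Set.empty
      = pvGrp (PySem.List.dedup ps) r := by
  induction ps using List.reverseRecOn generalizing r with
  | nil => simp [pvGrp, pysem]
  | append_singleton l p ih =>
    rw [List.foldl_append, List.foldl_cons, List.foldl_nil]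
    rw [PySem.List.dedup_eq_ofList] at *
    rw [PySem.Set.ofList_eq_foldl, List.foldl_append, ← PySem.Set.ofList_eq_foldl]
    simp only [List.foldl_cons, List.foldl_nil]
    by_cases hp : p ∈ PySem.Set.ofList l
    · have hadd : PySem.Set.add (PySem.Set.ofList l) p = PySem.Set.ofList l := by
        simp [PySem.Set.add, PySem.Set.contains, hp]
      rw [hadd, PySem.Dict.getD_insert]
      split_ifs with h
      · subst h
        rw [ih]
        have : (p.1 : String) ∈ pvGrp (PySem.Set.ofList l) p.2 := (mem_pvGrp _ _ _).2 hp
        simp [PySem.Set.add, PySem.Set.contains, this]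
      · exact ih r
    · have hadd : PySem.Set.add (PySem.Set.ofList l) p = PySem.Set.ofList l ++ [p] := by
        simp [PySem.Set.add, PySem.Set.contains, hp]
      rw [hadd, PySem.Dict.getD_insert, pvGrp_append]
      have hnm : (p.1 : String) ∉ pvGrp (PySem.Set.ofList l) p.2 := fun hx => hp ((mem_pvGrp _ _ _).1 hx)
      split_ifs with h1 h2 h3
      · subst h1; rw [ih]; simp [PySem.Set.add, PySem.Set.contains, hnm]
      · exact absurd h1.symm h2
      · exact absurd h3.symm h1
      · rw [ih]; simp

-- dict.fromkeys(id_list, 0): every lookup is 0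
theorem fromkeys_getD (id_list : List String) (x : String) :
    (id_list.foldl (fun u i => u.insert i (0 : Int)) PySem.Dict.empty).getD x 0 = 0 := by
  induction id_list using List.reverseRecOn with
  | nil => simp [pysem]
  | append_singleton l i ih => rw [List.foldl_append]; simp [PySem.Dict.getD_insert, ih]

-- updating a set with elements it already has changes nothing
theorem set_update_of_subset (s : PySem.Set String) (l : List String)
    (h : ∀ x ∈ l, x ∈ s) : PySem.Set.update s l = s := by
  induction l generalizing s with
  | nil => simp [PySem.Set.update]
  | cons x l ih =>
    have hx : PySem.Set.add s x = s := by
      simp [PySem.Set.add, PySem.Set.contains, h x (List.mem_cons_self)]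
    simp only [PySem.Set.update, List.foldl_cons] at *
    rw [hx, ih s (fun y hy => h y (List.mem_cons_of_mem _ hy))]

-- A's increment phase: each lookup gains one per qualifying occurrence
theorem incr_getD (vs : List (List String)) (k : Int) (u : PySem.Dict String Int) (x : String) :
    (vs.foldl (fun u ids =>
        if (ids.length : Int) < k then u
        else ids.foldl (fun u i => u.insert i (u.getD i 0 + 1)) u) u).getD x 0
      = u.getD x 0 + (vs.map (fun ids => if (ids.length : Int) < k then 0 else (ids.count x : Int))).sum := by
  induction vs generalizing u with
  | nil => simp
  | cons ids vs ih =>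
    simp only [List.foldl_cons, List.map_cons, List.sum_cons]
    by_cases h : (ids.length : Int) < k
    · simp only [if_pos h]; rw [ih]; ring
    · simp only [if_neg h]; rw [ih, PySem.Dict.getD_foldl_insert_add_one]; ring

-- A's increment phase: keys are preserved when every incremented id is already a key
theorem incr_keys (vs : List (List String)) (k : Int) (u : PySem.Dict String Int)
    (h : ∀ ids ∈ vs, ¬ ((ids.length : Int) < k) → ∀ i ∈ ids, i ∈ u.keys) :
    (vs.foldl (fun u ids =>
        if (ids.length : Int) < k then u
        else ids.foldl (fun u i => u.insert i (u.getD i 0 + 1)) u) u).keys = u.keys := by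
  induction vs generalizing u with
  | nil => rfl
  | cons ids vs ih =>
    simp only [List.foldl_cons]
    by_cases hk : (ids.length : Int) < k
    · rw [if_pos hk]; exact ih u (fun i hi => h i (List.mem_cons_of_mem _ hi))
    · rw [if_neg hk]
      have hkeys : (ids.foldl (fun u i => u.insert i (u.getD i 0 + 1)) u).keys = u.keys := by
        rw [PySem.Dict.keys_foldl_insert]
        exact set_update_of_subset _ _ (h ids (List.mem_cons_self) hk)
      rw [ih _ (fun i hi hki j hj => by rw [hkeys]; exact h i (List.mem_cons_of_mem _ hi) hki j hj), hkeys]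

theorem sum_ite_eq_count (R : List String) (c : String) (n : ℕ) (hnd : R.Nodup) (hm : c ∈ R) :
    (R.map (fun r => if c = r then n else 0)).sum = n := by
  induction R with
  | nil => cases hm
  | cons a R ih =>
    simp only [List.map_cons, List.sum_cons]
    rcases List.mem_cons.1 hm with h | h
    · subst h
      have : ∀ r ∈ R, (if c = r then n else 0) = 0 := by
        intro r hr
        have : c ≠ r := fun e => (List.nodup_cons.1 hnd).1 (e ▸ hr)
        simp [this]
      rw [List.map_congr_left this]
      simp
    · have hc : ¬ c = a := fun e => (List.nodup_cons.1 hnd).1 (e ▸ h)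
      rw [ih (List.nodup_cons.1 hnd).2 h]
      simp [hc]

-- grouping: counting over D equals summing the counts of each snd-group over a nodup cover R
theorem group_countP (D : List (String × String)) (R : List String) (q : String × String → Bool)
    (hnd : R.Nodup) (hc : ∀ p ∈ D, p.2 ∈ R) :
    (R.map (fun r => (D.filter (fun p => p.2 == r)).countP q)).sum = D.countP q := by
  induction D with
  | nil => simp
  | cons p D ih =>
    have hstep : ∀ r, ((p :: D).filter (fun p => p.2 == r)).countP q
        = (D.filter (fun p => p.2 == r)).countP q + (if p.2 = r then (if q p then 1 else 0) else 0) := by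
      intro r
      by_cases h : p.2 = r
      · simp [h, List.countP_cons]
      · simp [h]
    simp only [hstep]
    rw [List.sum_map_add, ih (fun p hp => hc p (List.mem_cons_of_mem _ hp)),
        sum_ite_eq_count R p.2 _ hnd (hc p List.mem_cons_self)]
    simp [List.countP_cons]

theorem countP_congr_mem (l : List (String × String)) (p q : String × String → Bool)
    (h : ∀ a ∈ l, p a = q a) : l.countP p = l.countP q := by
  induction l with
  | nil => rfl
  | cons a l ih => simp [List.countP_cons, h a List.mem_cons_self, ih (fun b hb => h b (List.mem_cons_of_mem _ hb))]

theorem cast_sum_map (l : List ℕ) : (l.map (Nat.cast : ℕ → Int)).sum = ((l.sum : ℕ) : Int) := by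
  induction l with
  | nil => rfl
  | cons a l ih =>
    rw [List.map_cons, List.sum_cons, List.sum_cons, ih]
    push_cast
    ring

-- unpacking a two-word report line, seen as A's loop body
theorem parse_body (d : PySem.Dict String (PySem.Set String)) (s : String)
    (h : (PySem.Str.split₀ s).length = 2) :
    (match PySem.Str.split₀ s with
     | [l, r] => d.insert r (PySem.Set.add (d.getD r PySem.Set.empty) l)
     | _ => d)
    = d.insert (pvParse s).2 (PySem.Set.add (d.getD (pvParse s).2 PySem.Set.empty) (pvParse s).1) := by
  unfold pvParse
  rcases hws : PySem.Str.split₀ s with _ | ⟨a, _ | ⟨b, _ | ⟨c, t⟩⟩⟩ <;> simp_all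

-- the value each side assigns to reportee-group r, per reporter x
theorem per_r (D : List (String × String)) (k : Int) (x r : String) :
    (if (((pvGrp D r).length : Int) < k) then (0 : Int) else ((pvGrp D r).count x : Int))
    = (((D.filter (fun p => p.2 == r)).countP
          (fun p => p.1 == x && decide (k ≤ ((D.map (·.2)).count p.2 : Int)))) : Int) := by
  set F := D.filter (fun p => p.2 == r) with hF
  have hcount : (D.map (·.2)).count r = F.length := by
    rw [hF, ← List.countP_eq_length_filter]
    simp [List.count_eq_countP, List.countP_map]
    rfl
  have hq : ∀ p ∈ F, (p.1 == x && decide (k ≤ ((D.map (·.2)).count p.2 : Int)))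
      = (p.1 == x && decide (k ≤ (F.length : Int))) := by
    intro p hp
    have h2 : p.2 = r := by simpa using (List.mem_filter.1 hp).2
    rw [h2, hcount]
  rw [countP_congr_mem _ _ _ hq]
  have hlen : (pvGrp D r).length = F.length := by simp [pvGrp, hF]
  by_cases hk : k ≤ (F.length : Int)
  · rw [if_neg (by rw [hlen]; omega)]
    have hq2 : ∀ p ∈ F, (p.1 == x && decide (k ≤ (F.length : Int))) = (p.1 == x) := by
      intro p _; simp [hk]
    rw [countP_congr_mem _ _ _ hq2]
    have : (pvGrp D r).count x = F.countP (fun p => p.1 == x) := by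
      simp [pvGrp, ← hF, List.count_eq_countP, List.countP_map]
      rfl
    rw [this]
  · rw [if_pos (by rw [hlen]; omega)]
    have hq2 : ∀ p ∈ F, (p.1 == x && decide (k ≤ (F.length : Int))) = false := by
      intro p _; simp [hk]
    rw [countP_congr_mem _ _ _ hq2]
    simp

-- ===== VERDICT (by name: the statement is the Claim_ definition above) =====
theorem solution_spec : Claim_equal_solution := by
  intro id_list report k _ hpre
  obtain ⟨h2, hrep⟩ := hpre
  unfold Spec_solution solution solution_alt
  dsimp only
  have hPmap : (fun s => (match PySem.Str.split₀ s with | [l, r] => ((l, r) : String × String) | _ => ("", ""))) = pvParse := by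
    funext s; unfold pvParse; rfl
  rw [hPmap]
  set P : List (String × String) := report.map pvParse with hP
  set D : List (String × String) := PySem.List.dedup P with hD
  set R : List String := PySem.Set.ofList (P.map (·.2)) with hR
  -- A's first loop equals the pair-indexed fold
  have hfold : report.foldl (fun d s =>
        match PySem.Str.split₀ s with
        | [l, r] => d.insert r (PySem.Set.add (d.getD r PySem.Set.empty) l)
        | _ => d) PySem.Dict.empty
      = P.foldl (fun d p => d.insert p.2 (PySem.Set.add (d.getD p.2 PySem.Set.empty) p.1)) PySem.Dict.empty := by
    rw [hP, List.foldl_map]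
    apply PySem.List.foldl_congr_mem
    intro d s hs
    exact parse_body d s (h2 s hs)
  rw [hfold]
  -- the black list's keys and values
  have hkeys : (P.foldl (fun d p => d.insert p.2 (PySem.Set.add (d.getD p.2 PySem.Set.empty) p.1))
      (PySem.Dict.empty : PySem.Dict String (PySem.Set String))).keys = R := by
    rw [PySem.Dict.keys_foldl_insert_key]
    simp [PySem.Set.update, PySem.Set.ofList_eq_foldl, hR]
  have hvals : (P.foldl (fun d p => d.insert p.2 (PySem.Set.add (d.getD p.2 PySem.Set.empty) p.1))
      (PySem.Dict.empty : PySem.Dict String (PySem.Set String))).values = R.map (fun r => pvGrp D r) := by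
    rw [PySem.Dict.values_eq_map_keys _ (by rw [hkeys]; exact PySem.Set.nodup_ofList _) PySem.Set.empty, hkeys]
    apply List.map_congr_left
    intro r _
    rw [black_getD, hD]
  rw [hvals]
  -- dict.fromkeys(id_list, 0)
  set U0 : PySem.Dict String Int := id_list.foldl (fun u i => u.insert i 0) PySem.Dict.empty with hU0
  have hU0keys : U0.keys = PySem.Set.ofList id_list := by
    rw [hU0, PySem.Dict.keys_foldl_insert]
    simp [PySem.Set.update, PySem.Set.ofList_eq_foldl]
  -- under Pre_, every incremented reporter is a key of users
  have hhot : ∀ ids ∈ R.map (fun r => pvGrp D r), ¬ ((ids.length : Int) < k) → ∀ i ∈ ids, i ∈ U0.keys := by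
    intro ids hids hk i hi
    rw [hU0keys]
    rw [PySem.Set.mem_ofList]
    obtain ⟨r, _, rfl⟩ := List.mem_map.1 hids
    have hpD : (i, r) ∈ D := (mem_pvGrp D i r).1 hi
    have hlen : (pvGrp D r).length = ((PySem.List.dedup (pvParsed report)).filter (fun q => q.2 == r)).length := by
      simp [pvGrp, pvParsed, hD, hP]
    exact hrep (i, r) hpD (by rw [← hlen]; omega)
  -- collapse A's increment phase
  have hukeys := incr_keys (R.map (fun r => pvGrp D r)) k U0 hhot
  rw [PySem.Dict.values_eq_map_keys _ (by rw [hukeys, hU0keys]; exact PySem.Set.nodup_ofList _) (0 : Int),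
      hukeys, hU0keys, PySem.List.dedup_eq_ofList]
  apply List.map_congr_left
  intro x _
  rw [incr_getD, hU0, fromkeys_getD, List.map_map, zero_add]
  -- B's count table is the snd-count of the deduped pairs
  have hcnt : ∀ r, (D.foldl (fun d p => d.insert p.2 (d.getD p.2 0 + 1)) PySem.Dict.empty).getD r 0
      = ((D.map (·.2)).count r : Int) := by
    intro r
    have hmf : (D.map (·.2)).foldl
        (fun (d : PySem.Dict String Int) (x : String) => d.insert x (d.getD x 0 + 1)) PySem.Dict.empty
        = D.foldl (fun d p => d.insert p.2 (d.getD p.2 0 + 1)) PySem.Dict.empty :=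
      by rw [List.foldl_map]
    rw [← hmf, PySem.Dict.getD_foldl_insert_add_one]
    simp [pysem]
  simp only [hcnt]
  rw [← List.countP_eq_length_filter]
  -- group B's count by reportee and compare groupwise
  have hcover : ∀ p ∈ D, p.2 ∈ R := by
    intro p hp
    rw [hR, PySem.Set.mem_ofList]
    exact List.mem_map_of_mem ((PySem.List.mem_dedup _ _).1 (hD ▸ hp))
  have hgroup := group_countP D R
      (fun p => p.1 == x && decide (k ≤ ((D.map (·.2)).count p.2 : Int)))
      (PySem.Set.nodup_ofList _) hcover
  have hmain : (R.map ((fun ids => if ((ids.length : Int) < k) then (0 : Int) else ((ids.count x : ℕ) : Int)) ∘ (fun r => pvGrp D r))).sum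
      = ((R.map (fun r => (D.filter (fun p => p.2 == r)).countP
            (fun p => p.1 == x && decide (k ≤ ((D.map (·.2)).count p.2 : Int))))).map (Nat.cast : ℕ → Int)).sum := by
    rw [List.map_map]
    apply congrArg List.sum
    apply List.map_congr_left
    intro r _
    simp only [Function.comp_apply]
    exact per_r D k x r
  rw [hmain, cast_sum_map]
  exact congrArg _ hgroup
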